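-- pv_equiv track=rewrite | github.com/chenjie/card-based-encryption-algorithm | cipher_functions.py | is_valid_deck
-- ===== SOURCE A (Python) =====
-- def is_valid_deck(deck_of_cards):
--     """ (list of int) -> bool
--
--     A valid deck contains every integer from 1 up to the number of cards in
--     the deck.
--     Return True if and only if the deck_of_cards is a valid deck of cards.
--
--     >>> is_valid_deck([1, 4, 3, 2])
--     True
--     >>> is_valid_deck([])
--     False
--     """
--
--     # If the length of deck_of_cards is less than 3, it's not a valid deck.
--     if len(deck_of_cards) < 3:
--         return False
--
--     # Otherwise, check whether every number from 1 up to the biggest integer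
--     # is in the deck_of_cards.
--     else:
--         for i in range(1, len(deck_of_cards) + 1):
--             if not (i in deck_of_cards):
--                 return False
--         return True
-- ===== SOURCE B (Python) =====
-- def is_valid_deck(deck_of_cards):
--     if len(deck_of_cards) < 3:
--         return False
--     return sorted(deck_of_cards) == list(range(1, len(deck_of_cards) + 1))
-- ===== Notes on version B (the rewrite author's own statement) =====
-- stated objective: simpler
-- what changed: Replaces the loop of repeated membership tests over 1..n with a single sort compared against list(range(1, n+1)).
import Mathlib
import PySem

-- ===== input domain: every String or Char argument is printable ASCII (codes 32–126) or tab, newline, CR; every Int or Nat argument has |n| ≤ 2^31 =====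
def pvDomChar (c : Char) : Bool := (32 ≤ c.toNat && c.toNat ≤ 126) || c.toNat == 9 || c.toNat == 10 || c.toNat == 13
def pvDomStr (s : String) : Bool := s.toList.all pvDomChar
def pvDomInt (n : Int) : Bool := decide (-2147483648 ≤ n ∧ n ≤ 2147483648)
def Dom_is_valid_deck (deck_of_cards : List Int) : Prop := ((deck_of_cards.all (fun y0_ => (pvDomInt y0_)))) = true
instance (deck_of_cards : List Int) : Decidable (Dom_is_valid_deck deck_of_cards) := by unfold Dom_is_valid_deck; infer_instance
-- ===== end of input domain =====

-- B replaces A's loop of repeated membership tests with one sort compared to range(1, n+1): a simpler one-liner.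


-- ===== PORT A =====
def isValidLoop (deck : List Int) : List Int → Bool
  | [] => true
  | i :: rest => if !(deck.contains i) then false else isValidLoop deck rest

def is_valid_deck (deck_of_cards : List Int) : Bool :=
  if deck_of_cards.length < 3 then false
  else isValidLoop deck_of_cards (PySem.List.pyRange 1 ((deck_of_cards.length : Int) + 1) 1)

-- ===== PORT B =====
def is_valid_deck_alt (deck_of_cards : List Int) : Bool :=
  if deck_of_cards.length < 3 then false
  else PySem.List.sorted deck_of_cards (fun x => x) false == PySem.List.pyRange 1 ((deck_of_cards.length : Int) + 1) 1

-- ===== PRECONDITION & SPEC =====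
def Spec_is_valid_deck (deck_of_cards : List Int) (out : Bool) : Prop := out = is_valid_deck_alt deck_of_cards
instance (deck_of_cards : List Int) (out : Bool) : Decidable (Spec_is_valid_deck deck_of_cards out) := by unfold Spec_is_valid_deck; infer_instance

-- ===== CLAIM (what is proved, stated in full; the proofs are below) =====
def Claim_equal_is_valid_deck : Prop := ∀ (deck_of_cards : List Int), Dom_is_valid_deck deck_of_cards → Spec_is_valid_deck deck_of_cards (is_valid_deck deck_of_cards)

-- ===== LEMMAS AND PROOFS =====

-- ===== VERDICT (by name: the statement is the Claim_ definition above) =====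
lemma isValidLoop_eq_all (deck : List Int) (l : List Int) :
    isValidLoop deck l = l.all (fun i => deck.contains i) := by
  induction l with
  | nil => rfl
  | cons i rest ih => simp [isValidLoop, ih]

lemma range_all_mem_iff_sorted (deck : List Int) :
    ((PySem.List.pyRange 1 ((deck.length : Int) + 1) 1).all (fun i => deck.contains i) = true)
      ↔ PySem.List.sorted deck (fun x => x) false = PySem.List.pyRange 1 ((deck.length : Int) + 1) 1 := by
  constructor
  · intro h
    apply PySem.List.sorted_eq_of_perm_of_pairwise_lt
    · apply List.Subperm.perm_of_length_le
      · exact List.subperm_of_subset (PySem.List.nodup_pyRange_one 1 _)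
          (by intro x hx; simpa using List.all_eq_true.mp h x hx)
      · simp [PySem.List.length_pyRange_one]
    · exact PySem.List.pairwise_lt_pyRange_one 1 _
  · intro h
    rw [List.all_eq_true]
    intro x hx
    have hperm := PySem.List.sorted_perm deck (fun x => x) false
    rw [h] at hperm
    simpa using hperm.mem_iff.mp hx

theorem is_valid_deck_spec : Claim_equal_is_valid_deck := by
  intro deck _
  unfold Spec_is_valid_deck is_valid_deck is_valid_deck_alt
  split
  · rfl
  · rw [isValidLoop_eq_all]
    by_cases hs : PySem.List.sorted deck (fun x => x) false = PySem.List.pyRange 1 ((deck.length : Int) + 1) 1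
    · rw [(range_all_mem_iff_sorted deck).mpr hs]
      simp [hs]
    · rw [beq_eq_false_iff_ne.mpr hs]
      exact Bool.eq_false_iff.mpr (fun hh => hs ((range_all_mem_iff_sorted deck).mp hh))
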